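-- pv_equiv track=rewrite | github.com/makerjy/sso_final_prj | text-to-sql/backend/app/services/agents/intent_guard.py | _find_final_select_clause
-- ===== SOURCE A (Python) =====
-- def _is_ident_char(ch: str) -> bool:
--     return ch.isalnum() or ch in {"_", "$", "#"}
--
-- def _token_at(text_upper: str, idx: int, token: str) -> bool:
--     token_len = len(token)
--     if text_upper[idx: idx + token_len] != token:
--         return False
--     prev = text_upper[idx - 1] if idx > 0 else " "
--     nxt = text_upper[idx + token_len] if idx + token_len < len(text_upper) else " "
--     if _is_ident_char(prev) or _is_ident_char(nxt):
--         return False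
--     return True
--
-- def _find_final_select_clause(sql: str) -> str:
--     core = str(sql or "").strip().rstrip(";")
--     if not core:
--         return ""
--
--     upper = core.upper()
--     depth = 0
--     in_single = False
--     last_select = -1
--     i = 0
--     while i < len(upper):
--         ch = upper[i]
--         if in_single:
--             if ch == "'":
--                 if i + 1 < len(upper) and upper[i + 1] == "'":
--                     i += 2
--                     continue
--                 in_single = False
--             i += 1
--             continue
--         if ch == "'":
--             in_single = True
--             i += 1
--             continue
--         if ch == "(":
--             depth += 1
--             i += 1
--             continue
--         if ch == ")":
--             depth = max(0, depth - 1)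
--             i += 1
--             continue
--         if depth == 0 and _token_at(upper, i, "SELECT"):
--             last_select = i
--             i += len("SELECT")
--             continue
--         i += 1
--
--     if last_select < 0:
--         return ""
--
--     depth = 0
--     in_single = False
--     i = last_select + len("SELECT")
--     from_idx = -1
--     while i < len(upper):
--         ch = upper[i]
--         if in_single:
--             if ch == "'":
--                 if i + 1 < len(upper) and upper[i + 1] == "'":
--                     i += 2
--                     continue
--                 in_single = False
--             i += 1
--             continue
--         if ch == "'":
--             in_single = True
--             i += 1
--             continue
--         if ch == "(":
--             depth += 1
--             i += 1
--             continue
--         if ch == ")":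
--             depth = max(0, depth - 1)
--             i += 1
--             continue
--         if depth == 0 and _token_at(upper, i, "FROM"):
--             from_idx = i
--             break
--         i += 1
--
--     if from_idx < 0:
--         return ""
--     return core[last_select + len("SELECT"):from_idx].strip()
-- ===== SOURCE B (Python) =====
-- def _is_ident_char(ch: str) -> bool:
--     return ch.isalnum() or ch in {"_", "$", "#"}
--
-- def _token_at(text_upper: str, idx: int, token: str) -> bool:
--     token_len = len(token)
--     if text_upper[idx: idx + token_len] != token:
--         return False
--     prev = text_upper[idx - 1] if idx > 0 else " "
--     nxt = text_upper[idx + token_len] if idx + token_len < len(text_upper) else " "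
--     if _is_ident_char(prev) or _is_ident_char(nxt):
--         return False
--     return True
--
-- def _find_final_select_clause(sql: str) -> str:
--     core = str(sql or "").strip().rstrip(";")
--     if not core:
--         return ""
--     upper = core.upper()
--     n = len(upper)
--     events = []  # (index, is_select) for every top-level SELECT/FROM token, one pass
--     depth = 0
--     in_single = False
--     i = 0
--     while i < n:
--         ch = upper[i]
--         if in_single:
--             if ch == "'":
--                 if i + 1 < n and upper[i + 1] == "'":
--                     i += 2
--                     continue
--                 in_single = False
--             i += 1
--             continue
--         if ch == "'":
--             in_single = True
--             i += 1
--             continue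
--         if ch == "(":
--             depth += 1
--             i += 1
--             continue
--         if ch == ")":
--             depth = max(0, depth - 1)
--             i += 1
--             continue
--         if depth == 0:
--             if _token_at(upper, i, "SELECT"):
--                 events.append((i, True))
--                 i += 6
--                 continue
--             if _token_at(upper, i, "FROM"):
--                 events.append((i, False))
--         i += 1
--
--     selects = [j for j, is_sel in events if is_sel]
--     if not selects:
--         return ""
--     last_select = selects[-1]
--     from_idx = next((j for j, is_sel in events if not is_sel and j > last_select), -1)
--     if from_idx < 0:
--         return ""
--     return core[last_select + 6:from_idx].strip()
-- ===== Notes on version B (the rewrite author's own statement) =====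
-- stated objective: alternative
-- what changed: A makes two independent stateful scans of the SQL text (one full scan tracking quotes/parens to find the last top-level SELECT, then a second scan restarted after it to find the next top-level FROM); B makes a single pass that records every top-level SELECT/FROM token position in one event list and then picks the last SELECT index and the first FROM index after it from that list.
import Mathlib
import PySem

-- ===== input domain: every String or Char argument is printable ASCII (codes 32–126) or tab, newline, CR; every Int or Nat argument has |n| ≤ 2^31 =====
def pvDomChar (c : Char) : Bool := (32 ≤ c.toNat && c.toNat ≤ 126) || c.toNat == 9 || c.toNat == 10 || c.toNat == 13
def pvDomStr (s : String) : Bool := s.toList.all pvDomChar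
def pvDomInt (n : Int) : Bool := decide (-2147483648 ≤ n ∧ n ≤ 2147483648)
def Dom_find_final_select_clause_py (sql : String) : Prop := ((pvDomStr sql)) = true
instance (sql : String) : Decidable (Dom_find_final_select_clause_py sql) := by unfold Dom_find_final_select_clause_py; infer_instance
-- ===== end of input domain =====

-- B replaces A's two quote/paren state-machine scans (one finding the last top-level SELECT, a
-- second restarted scan finding its FROM) by ONE pass that collects every top-level SELECT/FROM
-- token position into an event list and reads the answer off that list (objective: alternative).

-- ===== PORT A =====
-- helper _is_ident_char (identical in both Python files)
def pvIdentChar (ch : Char) : Bool :=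
  PySem.Chars.isalnum ch || (ch == '_' || ch == '$' || ch == '#')

-- helper _token_at (identical in both Python files); called only with a nonneg in-range idx, so
-- Python's slice text_upper[idx:idx+L] is exactly (drop idx).take L and the indexing is getD.
def pvTokenAt (u : List Char) (idx : Nat) (token : List Char) : Bool :=
  if ((u.drop idx).take token.length) ≠ token then false
  else
    let prev := if 0 < idx then u.getD (idx - 1) ' ' else ' '
    let nxt := if idx + token.length < u.length then u.getD (idx + token.length) ' ' else ' '
    if pvIdentChar prev || pvIdentChar nxt then false else true

def pvSelectTok : List Char := ['S', 'E', 'L', 'E', 'C', 'T']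
def pvFromTok : List Char := ['F', 'R', 'O', 'M']

-- A's first while loop: the final value of last_select
def pvALoop1 (u : List Char) (i : Nat) (depth : Int) (inSingle : Bool) (lastSelect : Int) : Int :=
  if h : i < u.length then
    let ch := u.getD i ' '
    if inSingle then
      if ch == '\'' then
        if i + 1 < u.length && (u.getD (i + 1) ' ' == '\'') then
          pvALoop1 u (i + 2) depth inSingle lastSelect
        else pvALoop1 u (i + 1) depth false lastSelect
      else pvALoop1 u (i + 1) depth inSingle lastSelect
    else if ch == '\'' then pvALoop1 u (i + 1) depth true lastSelect
    else if ch == '(' then pvALoop1 u (i + 1) (depth + 1) inSingle lastSelect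
    else if ch == ')' then pvALoop1 u (i + 1) (max 0 (depth - 1)) inSingle lastSelect
    else if depth == 0 && pvTokenAt u i pvSelectTok then
      pvALoop1 u (i + 6) depth inSingle (Int.ofNat i)
    else pvALoop1 u (i + 1) depth inSingle lastSelect
  else lastSelect
termination_by u.length - i
decreasing_by all_goals omega

-- A's second while loop: from_idx (-1 if the loop ends without break)
def pvALoop2 (u : List Char) (i : Nat) (depth : Int) (inSingle : Bool) : Int :=
  if h : i < u.length then
    let ch := u.getD i ' '
    if inSingle then
      if ch == '\'' then
        if i + 1 < u.length && (u.getD (i + 1) ' ' == '\'') then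
          pvALoop2 u (i + 2) depth inSingle
        else pvALoop2 u (i + 1) depth false
      else pvALoop2 u (i + 1) depth inSingle
    else if ch == '\'' then pvALoop2 u (i + 1) depth true
    else if ch == '(' then pvALoop2 u (i + 1) (depth + 1) inSingle
    else if ch == ')' then pvALoop2 u (i + 1) (max 0 (depth - 1)) inSingle
    else if depth == 0 && pvTokenAt u i pvFromTok then Int.ofNat i
    else pvALoop2 u (i + 1) depth inSingle
  else -1
termination_by u.length - i
decreasing_by all_goals omega

def find_final_select_clause_py (sql : String) : String :=
  -- core = str(sql or "").strip().rstrip(";"); rstrip(";") hand-ported as dropping trailing ';'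
  -- characters (exact: Python removes every trailing character belonging to ";").
  let core := ((PySem.Chars.strip sql.toList).reverse.dropWhile (fun c => c == ';')).reverse
  if core.isEmpty then ""
  else
    let upper := PySem.Chars.upper core
    let lastSelect := pvALoop1 upper 0 0 false (-1)
    if lastSelect < 0 then ""
    else
      let fromIdx := pvALoop2 upper (lastSelect.toNat + 6) 0 false
      if fromIdx < 0 then ""
      else
        -- core[last_select+6:from_idx].strip(): both bounds nonneg, so the slice is drop/take
        String.ofList (PySem.Chars.strip ((core.drop (lastSelect.toNat + 6)).take (fromIdx.toNat - (lastSelect.toNat + 6))))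

-- ===== PORT B =====
-- B's single pass: the `events` list of (index, is_select) for every top-level SELECT/FROM token
def pvScan (u : List Char) (i : Nat) (depth : Int) (inSingle : Bool) : List (Nat × Bool) :=
  if h : i < u.length then
    let ch := u.getD i ' '
    if inSingle then
      if ch == '\'' then
        if i + 1 < u.length && (u.getD (i + 1) ' ' == '\'') then
          pvScan u (i + 2) depth inSingle
        else pvScan u (i + 1) depth false
      else pvScan u (i + 1) depth inSingle
    else if ch == '\'' then pvScan u (i + 1) depth true
    else if ch == '(' then pvScan u (i + 1) (depth + 1) inSingle
    else if ch == ')' then pvScan u (i + 1) (max 0 (depth - 1)) inSingle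
    else if depth == 0 && pvTokenAt u i pvSelectTok then
      (i, true) :: pvScan u (i + 6) depth inSingle
    else if depth == 0 && pvTokenAt u i pvFromTok then
      (i, false) :: pvScan u (i + 1) depth inSingle
    else pvScan u (i + 1) depth inSingle
  else []
termination_by u.length - i
decreasing_by all_goals omega

def find_final_select_clause_py_alt (sql : String) : String :=
  let core := ((PySem.Chars.strip sql.toList).reverse.dropWhile (fun c => c == ';')).reverse
  if core.isEmpty then ""
  else
    let upper := PySem.Chars.upper core
    let events := pvScan upper 0 0 false
    let selects := events.filterMap (fun e => if e.2 then some e.1 else none)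
    match selects.getLast? with
    | none => ""
    | some ls =>
      -- from_idx = next((j for j, is_sel in events if not is_sel and j > last_select), -1)
      match events.find? (fun e => !e.2 && decide (ls < e.1)) with
      | none => ""
      | some e =>
        String.ofList (PySem.Chars.strip ((core.drop (ls + 6)).take (e.1 - (ls + 6))))

-- ===== PRECONDITION & SPEC =====
def Spec_find_final_select_clause_py (sql : String) (out : String) : Prop := out = find_final_select_clause_py_alt sql
instance (sql : String) (out : String) : Decidable (Spec_find_final_select_clause_py sql out) := by unfold Spec_find_final_select_clause_py; infer_instance

-- ===== CLAIM (what is proved, stated in full; the proofs are below) =====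
def Claim_equal_find_final_select_clause_py : Prop := ∀ (sql : String), Dom_find_final_select_clause_py sql → Spec_find_final_select_clause_py sql (find_final_select_clause_py sql)

-- ===== LEMMAS AND PROOFS =====

theorem pv_getD_drop (u : List Char) (i k : Nat) (d : Char) :
    u.getD (i + k) d = ((u.drop i)[k]?).getD d := by
  rw [List.getD_eq_getElem?_getD, List.getElem?_drop]

theorem pv_drop_select (u : List Char) (i : Nat) (h : pvTokenAt u i pvSelectTok = true) :
    u.drop i = ['S', 'E', 'L', 'E', 'C', 'T'] ++ u.drop (i + 6) := by
  unfold pvTokenAt at h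
  by_cases hne : (u.drop i).take pvSelectTok.length ≠ pvSelectTok
  · rw [if_pos hne] at h; exact absurd h (by simp)
  · have heq := not_not.mp hne
    have hsplit := (List.take_append_drop pvSelectTok.length (u.drop i)).symm
    rw [heq, List.drop_drop] at hsplit
    simpa [pvSelectTok] using hsplit

theorem pv_select_len (u : List Char) (i : Nat) (h : pvTokenAt u i pvSelectTok = true) :
    i + 6 ≤ u.length := by
  have hlen := congrArg List.length (pv_drop_select u i h)
  simp at hlen
  omega

theorem pv_select_chars (u : List Char) (i : Nat) (h : pvTokenAt u i pvSelectTok = true) :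
    ∀ k : Nat, k < 6 → u.getD (i + k) ' ' = ['S', 'E', 'L', 'E', 'C', 'T'].getD k ' ' := by
  intro k hk
  rw [pv_getD_drop, pv_drop_select u i h]
  interval_cases k <;> rfl

theorem pvTokenAt_from_false (u : List Char) (j : Nat) (hj : j < u.length)
    (hc : u.getD j ' ' ≠ 'F') : pvTokenAt u j pvFromTok = false := by
  have hne : (u.drop j).take pvFromTok.length ≠ pvFromTok := by
    intro heq
    apply hc
    have h0 : ((u.drop j).take pvFromTok.length)[0]? = some 'F' := by rw [heq]; rfl
    rw [List.getElem?_take_of_lt (by simp [pvFromTok])] at h0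
    have hg := pv_getD_drop u j 0 ' '
    simp only [Nat.add_zero] at hg
    rw [hg, h0]
    rfl
  unfold pvTokenAt
  rw [if_pos hne]

theorem pv_select_not_from (u : List Char) (i : Nat) (h : pvTokenAt u i pvSelectTok = true) :
    pvTokenAt u i pvFromTok = false := by
  have hlen := pv_select_len u i h
  apply pvTokenAt_from_false u i (by omega)
  have hc := pv_select_chars u i h 0 (by omega)
  simp at hc
  rw [List.getD_eq_getElem?_getD, hc]
  decide

theorem pvALoop2_step (u : List Char) (j : Nat) (hj : j < u.length)
    (h1 : u.getD j ' ' ≠ '\'') (h2 : u.getD j ' ' ≠ '(') (h3 : u.getD j ' ' ≠ ')')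
    (h4 : u.getD j ' ' ≠ 'F') :
    pvALoop2 u j 0 false = pvALoop2 u (j + 1) 0 false := by
  have hF := pvTokenAt_from_false u j hj h4
  have hg : u.getD j ' ' = u[j] := List.getD_eq_getElem u ' ' hj
  rw [hg] at h1 h2 h3
  conv_lhs => rw [pvALoop2.eq_def]
  simp [hj, h1, h2, h3, hF, beq_iff_eq]

-- A's second loop steps over the five remaining characters of a detected SELECT without effect
theorem pvALoop2_skip_select (u : List Char) (i : Nat) (h : pvTokenAt u i pvSelectTok = true) :
    pvALoop2 u (i + 1) 0 false = pvALoop2 u (i + 6) 0 false := by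
  have hlen := pv_select_len u i h
  have hc := pv_select_chars u i h
  have step : ∀ k : Nat, 1 ≤ k → k < 6 →
      pvALoop2 u (i + k) 0 false = pvALoop2 u (i + k + 1) 0 false := by
    intro k h1 h6
    have hck := hc k h6
    refine pvALoop2_step u (i + k) (by omega) ?_ ?_ ?_ ?_ <;>
      (rw [hck]; interval_cases k <;> decide)
  calc pvALoop2 u (i + 1) 0 false
      = pvALoop2 u (i + 2) 0 false := step 1 (by omega) (by omega)
    _ = pvALoop2 u (i + 3) 0 false := step 2 (by omega) (by omega)
    _ = pvALoop2 u (i + 4) 0 false := step 3 (by omega) (by omega)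
    _ = pvALoop2 u (i + 5) 0 false := step 4 (by omega) (by omega)
    _ = pvALoop2 u (i + 6) 0 false := step 5 (by omega) (by omega)

-- A's first loop computes the fold of B's event list
theorem pvALoop1_eq_scan (u : List Char) (i : Nat) (d : Int) (s : Bool) (ls : Int) :
    pvALoop1 u i d s ls =
      (pvScan u i d s).foldl (fun acc e => if e.2 then Int.ofNat e.1 else acc) ls := by
  rw [pvALoop1.eq_def, pvScan.eq_def]
  by_cases h : i < u.length
  · simp only [dif_pos h]
    split_ifs <;> (try rw [List.foldl_cons]) <;>
      first
        | exact pvALoop1_eq_scan u (i + 2) d s ls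
        | exact pvALoop1_eq_scan u (i + 1) d false ls
        | exact pvALoop1_eq_scan u (i + 1) d true ls
        | exact pvALoop1_eq_scan u (i + 1) (d + 1) s ls
        | exact pvALoop1_eq_scan u (i + 1) (max 0 (d - 1)) s ls
        | exact pvALoop1_eq_scan u (i + 1) d s ls
        | exact pvALoop1_eq_scan u (i + 6) d s (Int.ofNat i)
  · simp only [dif_neg h]
    simp
termination_by u.length - i
decreasing_by all_goals omega

-- A's second loop returns the first FROM event of B's scan
theorem pvALoop2_eq_scan (u : List Char) (i : Nat) (d : Int) (s : Bool) :
    pvALoop2 u i d s =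
      (match (pvScan u i d s).find? (fun e => !e.2) with
       | some e => Int.ofNat e.1
       | none => -1) := by
  rw [pvALoop2.eq_def, pvScan.eq_def]
  by_cases h : i < u.length
  · simp only [dif_pos h]
    split_ifs <;>
      first
        | exact pvALoop2_eq_scan u (i + 2) d s
        | exact pvALoop2_eq_scan u (i + 1) d false
        | exact pvALoop2_eq_scan u (i + 1) d true
        | exact pvALoop2_eq_scan u (i + 1) (d + 1) s
        | exact pvALoop2_eq_scan u (i + 1) (max 0 (d - 1)) s
        | exact pvALoop2_eq_scan u (i + 1) d s
        | (rw [List.find?_cons_of_pos (p := fun e : Nat × Bool => !e.2) (a := (i, false)) rfl]; try rfl)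
        | (rename_i hns hq hp1 hp2 hnFrom hSel
           simp only [Bool.and_eq_true, beq_iff_eq] at hSel
           obtain ⟨hd0, htok⟩ := hSel
           subst hd0
           rw [Bool.not_eq_true] at hns
           subst hns
           rw [List.find?_cons_of_neg (p := fun e : Nat × Bool => !e.2) (a := (i, true)) (by simp)]
           rw [← pvALoop2_eq_scan u (i + 6) 0 false]
           exact pvALoop2_skip_select u i htok)
        | (rename_i hFrom hSel
           exfalso
           simp only [Bool.and_eq_true, beq_iff_eq] at hFrom hSel
           have hnf := pv_select_not_from u i hSel.2
           rw [hnf] at hFrom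
           exact absurd hFrom.2 (by simp))
  · simp only [dif_neg h]
    rfl
termination_by u.length - i
decreasing_by all_goals omega

theorem pvScan_lb (u : List Char) (i : Nat) (d : Int) (s : Bool) :
    ∀ e ∈ pvScan u i d s, i ≤ e.1 := by
  fun_induction pvScan u i d s
  case case10 => intro e he; simp at he
  all_goals intro e he
  all_goals rename_i ih
  all_goals first
    | (rcases List.mem_cons.mp he with rfl | hm
       · simp
       · exact le_trans (by omega) (ih e hm))
    | exact le_trans (by omega) (ih e he)

theorem pvScan_pairwise (u : List Char) (i : Nat) (d : Int) (s : Bool) :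
    (pvScan u i d s).Pairwise (fun a b => a.1 < b.1) := by
  fun_induction pvScan u i d s
  case case10 => simp
  all_goals rename_i ih
  all_goals first
    | exact ih
    | (refine List.Pairwise.cons (fun b hb => ?_) ih
       have hlb := pvScan_lb _ _ _ _ b hb
       refine lt_of_lt_of_le ?_ hlb
       norm_num)

-- the events after a SELECT event followed only by FROM events are the scan restarted after it
theorem pvScan_split (u : List Char) (i : Nat) (d : Int) (s : Bool) :
    ∀ l1 j l2, pvScan u i d s = l1 ++ (j, true) :: l2 →
      (∀ e ∈ l2, e.2 = false) → l2 = pvScan u (j + 6) 0 false := by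
  fun_induction pvScan u i d s
  case case10 => intro l1 j l2 h hf; simp at h
  case case7 =>
    rename_i hns hq hp1 hp2 hsel ih
    intro l1 j l2 h hf
    simp only [Bool.and_eq_true, beq_iff_eq] at hsel
    rw [Bool.not_eq_true] at hns
    cases l1 with
    | nil =>
      simp only [List.nil_append] at h
      injection h with h1 h2
      injection h1 with hij _
      rw [← h2, hsel.1, hns, hij]
    | cons a l1' =>
      simp only [List.cons_append] at h
      injection h with _ h2
      exact ih l1' j l2 h2 hf
  case case8 =>
    rename_i hnsel hfrom ih
    intro l1 j l2 h hf
    cases l1 with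
    | nil =>
      simp only [List.nil_append] at h
      injection h with h1 _
      injection h1 with _ hb
      exact absurd hb (by simp)
    | cons a l1' =>
      simp only [List.cons_append] at h
      injection h with _ h2
      exact ih l1' j l2 h2 hf
  all_goals rename_i ih
  all_goals exact ih

theorem pv_lastSel_split (E : List (Nat × Bool)) (ls : Nat)
    (h : (E.filterMap (fun e => if e.2 then some e.1 else none)).getLast? = some ls) :
    ∃ l1 l2, E = l1 ++ (ls, true) :: l2 ∧ ∀ e ∈ l2, e.2 = false := by
  induction E with
  | nil => simp at h
  | cons a t ih =>
    obtain ⟨x, b⟩ := a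
    cases b with
    | false =>
      rw [List.filterMap_cons_none (by simp)] at h
      obtain ⟨l1, l2, he, hf⟩ := ih h
      exact ⟨(x, false) :: l1, l2, by rw [he, List.cons_append], hf⟩
    | true =>
      have hfm : List.filterMap (fun e => if e.2 = true then some e.1 else none) ((x, true) :: t)
          = x :: List.filterMap (fun e => if e.2 = true then some e.1 else none) t := by
        simp
      rw [hfm] at h
      cases htf : t.filterMap (fun e => if e.2 then some e.1 else none) with
      | nil =>
        rw [htf, List.getLast?_singleton] at h
        injection h with hx
        refine ⟨[], t, by rw [hx, List.nil_append], fun e he => ?_⟩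
        have hnone := List.forall_none_of_filterMap_eq_nil htf e he
        by_cases hb : e.2 = true
        · rw [if_pos hb] at hnone; exact absurd hnone (by simp)
        · simpa using hb
      | cons y ys =>
        rw [htf, List.getLast?_cons_cons, ← htf] at h
        obtain ⟨l1, l2, he, hf⟩ := ih h
        exact ⟨(x, true) :: l1, l2, by rw [he, List.cons_append], hf⟩

theorem pv_foldl_lastSel (E : List (Nat × Bool)) (init : Int) :
    E.foldl (fun acc e => if e.2 then Int.ofNat e.1 else acc) init =
      (((E.filterMap (fun e => if e.2 then some e.1 else none)).getLast?).map Int.ofNat).getD init := by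
  induction E generalizing init with
  | nil => simp
  | cons a t ih =>
    obtain ⟨x, b⟩ := a
    cases b with
    | false =>
      rw [List.foldl_cons, List.filterMap_cons_none (by simp)]
      simpa using ih init
    | true =>
      have hfm : List.filterMap (fun e => if e.2 = true then some e.1 else none) ((x, true) :: t)
          = x :: List.filterMap (fun e => if e.2 = true then some e.1 else none) t := by
        simp
      rw [List.foldl_cons, hfm]
      show t.foldl (fun acc e => if e.2 then Int.ofNat e.1 else acc) (Int.ofNat x) = _
      rw [ih (Int.ofNat x)]
      cases hFMt : t.filterMap (fun e => if e.2 then some e.1 else none) with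
      | nil => simp
      | cons y ys =>
        rw [List.getLast?_cons_cons]
        obtain ⟨z, hz⟩ := Option.isSome_iff_exists.mp
          ((List.getLast?_isSome (l := y :: ys)).mpr (by simp))
        rw [hz]
        simp

theorem pv_main (core : List Char) :
    (if pvALoop1 (PySem.Chars.upper core) 0 0 false (-1) < 0 then ""
     else if pvALoop2 (PySem.Chars.upper core) ((pvALoop1 (PySem.Chars.upper core) 0 0 false (-1)).toNat + 6) 0 false < 0 then ""
     else String.ofList (PySem.Chars.strip ((core.drop ((pvALoop1 (PySem.Chars.upper core) 0 0 false (-1)).toNat + 6)).take ((pvALoop2 (PySem.Chars.upper core) ((pvALoop1 (PySem.Chars.upper core) 0 0 false (-1)).toNat + 6) 0 false).toNat - ((pvALoop1 (PySem.Chars.upper core) 0 0 false (-1)).toNat + 6))))) =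
    (match ((pvScan (PySem.Chars.upper core) 0 0 false).filterMap (fun e => if e.2 then some e.1 else none)).getLast? with
     | none => ""
     | some ls =>
       match (pvScan (PySem.Chars.upper core) 0 0 false).find? (fun e => !e.2 && decide (ls < e.1)) with
       | none => ""
       | some e => String.ofList (PySem.Chars.strip ((core.drop (ls + 6)).take (e.1 - (ls + 6))))) := by
  generalize PySem.Chars.upper core = u
  rw [pvALoop1_eq_scan, pv_foldl_lastSel]
  set E := pvScan u 0 0 false with hE
  set FM := E.filterMap (fun e => if e.2 then some e.1 else none) with hFM
  cases hL : FM.getLast? with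
  | none => simp
  | some ls =>
    simp only [Option.map_some, Option.getD_some]
    rw [show (Int.ofNat ls).toNat = ls from rfl]
    rw [if_neg (show ¬ (Int.ofNat ls < 0) from not_lt.mpr (Int.natCast_nonneg ls))]
    obtain ⟨l1, l2, hsplit, hl2f⟩ := pv_lastSel_split E ls (by rw [← hFM]; exact hL)
    have hl2 : l2 = pvScan u (ls + 6) 0 false :=
      pvScan_split u 0 0 false l1 ls l2 (by rw [← hE]; exact hsplit) hl2f
    have hpair := pvScan_pairwise u 0 0 false
    rw [← hE, hsplit] at hpair
    have hmem : ∀ x ∈ l1, x.1 < ls := by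
      intro x hx
      have := (List.pairwise_append.mp hpair).2.2 x hx (ls, true) (by simp)
      simpa using this
    have h1none : l1.find? (fun e => !e.2 && decide (ls < e.1)) = none := by
      rw [List.find?_eq_none]
      intro x hx
      have := hmem x hx
      intro hcontra
      simp only [Bool.and_eq_true, decide_eq_true_eq] at hcontra
      omega
    rw [pvALoop2_eq_scan u (ls + 6) 0 false, ← hl2]
    rw [hsplit, List.find?_append, h1none, Option.none_or, List.find?_cons_of_neg (by simp)]
    rcases l2 with _ | ⟨a, t⟩
    · simp
    · have ha2 : a.2 = false := hl2f a (by simp)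
      have halb : ls + 6 ≤ a.1 := pvScan_lb u (ls + 6) 0 false a (by rw [← hl2]; simp)
      rw [List.find?_cons_of_pos (p := fun e : Nat × Bool => !e.2) (by simp [ha2]),
          List.find?_cons_of_pos (p := fun e : Nat × Bool => !e.2 && decide (ls < e.1))
            (by simp only [ha2, Bool.not_false, Bool.true_and, decide_eq_true_eq]; omega)]
      rw [show (match some a with | some e => Int.ofNat e.1 | none => (-1 : Int)) = Int.ofNat a.1 from rfl]
      rw [if_neg (show ¬ (Int.ofNat a.1 < 0) from not_lt.mpr (Int.natCast_nonneg a.1))]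
      rfl

-- ===== VERDICT (by name: the statement is the Claim_ definition above) =====
theorem find_final_select_clause_py_spec : Claim_equal_find_final_select_clause_py := by
  intro sql _
  unfold Spec_find_final_select_clause_py
  simp only [find_final_select_clause_py, find_final_select_clause_py_alt]
  by_cases h : (((PySem.Chars.strip sql.toList).reverse.dropWhile (fun c => c == ';')).reverse).isEmpty = true
  · simp only [if_pos h]
  · simp only [if_neg h]
    exact pv_main _
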